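-- pv_equiv track=rewrite | github.com/ssau-data-engineering/Lab-3 | validate_model.py | is_equal_experiments
-- ===== SOURCE A (Python) =====
-- def is_equal_experiments(e1, e2):
--     if isinstance(e1, dict) and isinstance(e2, dict):
--         for k1, v1 in e1.items():
--             if k1 in e2 and e2[k1] == str(v1):
--                 continue
--             return False
--         return True
--     return False
-- ===== SOURCE B (Python) =====
-- def is_equal_experiments(e1, e2):
--     if not (isinstance(e1, dict) and isinstance(e2, dict)):
--         return False
--     matched = sum(1 for k2, v2 in e2.items() if k2 in e1 and str(e1[k2]) == v2)
--     return matched == len(e1)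
-- ===== Notes on version B (the rewrite author's own statement) =====
-- stated objective: alternative
-- what changed: Instead of looping over e1 with early return on a failed lookup in e2, B traverses e2 once, counts the entries of e2 that match a stringified entry of e1, and decides by the cardinality comparison matched == len(e1) (valid since dict keys are distinct); Pre_ only excludes association lists with duplicate keys, which represent no Python dict.
import Mathlib
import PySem

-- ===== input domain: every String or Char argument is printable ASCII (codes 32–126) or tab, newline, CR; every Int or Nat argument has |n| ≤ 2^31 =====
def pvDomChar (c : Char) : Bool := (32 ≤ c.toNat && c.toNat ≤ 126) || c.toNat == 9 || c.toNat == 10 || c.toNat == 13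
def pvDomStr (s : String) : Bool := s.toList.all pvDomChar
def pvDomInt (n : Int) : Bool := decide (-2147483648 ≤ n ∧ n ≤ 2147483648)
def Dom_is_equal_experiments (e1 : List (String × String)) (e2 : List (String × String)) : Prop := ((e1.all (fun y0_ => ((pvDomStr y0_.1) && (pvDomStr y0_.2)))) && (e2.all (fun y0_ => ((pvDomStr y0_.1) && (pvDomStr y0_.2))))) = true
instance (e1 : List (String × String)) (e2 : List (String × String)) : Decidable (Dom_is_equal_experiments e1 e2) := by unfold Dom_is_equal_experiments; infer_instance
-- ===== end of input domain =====

-- B traverses e2 (not e1), counting the entries of e2 that match a stringified entry of e1,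
-- and decides by the cardinality comparison matched == len(e1) (alternative; same cost).
-- Both arguments stand for Python dicts, so the isinstance guards are statically `true`.

-- ===== PORT A =====
-- the 'for k1, v1 in e1.items(): if k1 in e2 and e2[k1] == str(v1): continue; return False' loop;
-- str(v1) on a string v1 is v1 itself
def is_equal_experiments_loopA (l : List (String × String)) (d2 : PySem.Dict String String) : Bool :=
  match l with
  | [] => true
  | (k1, v1) :: rest =>
      if d2.contains k1 && (d2.get? k1 == some v1) then is_equal_experiments_loopA rest d2
      else false

def is_equal_experiments (e1 : List (String × String)) (e2 : List (String × String)) : Bool :=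
  is_equal_experiments_loopA e1 (PySem.Dict.mk e2)

-- ===== PORT B =====
-- matched = sum(1 for k2, v2 in e2.items() if k2 in e1 and str(e1[k2]) == v2); return matched == len(e1)
def is_equal_experiments_alt (e1 : List (String × String)) (e2 : List (String × String)) : Bool :=
  let d1 : PySem.Dict String String := PySem.Dict.mk e1
  let matched : Int :=
    e2.foldl (fun acc p => if d1.contains p.1 && (d1.get? p.1 == some p.2) then acc + 1 else acc) 0
  matched == (d1.size : Int)

-- ===== PRECONDITION & SPEC =====
-- The arguments stand for Python dicts, whose keys are necessarily distinct; Pre_ excludes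
-- association lists with duplicate keys, which represent no Python dict (on such lists the
-- two ports' values are artefacts of first-match vs last-wins reading).
def Pre_is_equal_experiments (e1 : List (String × String)) (e2 : List (String × String)) : Prop :=
  (e1.map Prod.fst).Nodup ∧ (e2.map Prod.fst).Nodup
instance (e1 : List (String × String)) (e2 : List (String × String)) : Decidable (Pre_is_equal_experiments e1 e2) := by unfold Pre_is_equal_experiments; infer_instance

def pvWitness_is_equal_experiments : (List (String × String)) × (List (String × String)) :=
  ([("a", "1")], [("a", "1"), ("b", "2")])

def Spec_is_equal_experiments (e1 : List (String × String)) (e2 : List (String × String)) (out : Bool) : Prop := out = is_equal_experiments_alt e1 e2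
instance (e1 : List (String × String)) (e2 : List (String × String)) (out : Bool) : Decidable (Spec_is_equal_experiments e1 e2 out) := by unfold Spec_is_equal_experiments; infer_instance

-- ===== CLAIM (what is proved, stated in full; the proofs are below) =====
def Claim_equal_is_equal_experiments : Prop := ∀ (e1 : List (String × String)) (e2 : List (String × String)), Dom_is_equal_experiments e1 e2 → Pre_is_equal_experiments e1 e2 → Spec_is_equal_experiments e1 e2 (is_equal_experiments e1 e2)

-- ===== LEMMAS AND PROOFS =====

-- pointwise: on a duplicate-free association list l, `k in l and l[k] == v` equals `(k, v) in l.items()`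
theorem pv_point (l : List (String × String)) (h : (l.map Prod.fst).Nodup)
    (k v : String) :
    ((PySem.Dict.mk l).contains k && ((PySem.Dict.mk l).get? k == some v)) = l.contains (k, v) := by
  have hkeys : (PySem.Dict.mk l).keys.Nodup := by
    simpa [PySem.Dict.keys_mk] using h
  have hiff : (PySem.Dict.mk l).get? k = some v ↔ (k, v) ∈ l := by
    simpa using PySem.Dict.get?_eq_some_iff_mem_items (d := PySem.Dict.mk l) hkeys (k := k) (v := v)
  by_cases hm : (k, v) ∈ l
  · have hg : (PySem.Dict.mk l).get? k = some v := hiff.mpr hm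
    have hc : (PySem.Dict.mk l).contains k = true := by
      rw [PySem.Dict.contains_eq_isSome_get?, hg]; rfl
    simp [hg, hc, hm]
  · have hg : (PySem.Dict.mk l).get? k ≠ some v := fun h' => hm (hiff.mp h')
    have hb : ((PySem.Dict.mk l).get? k == some v) = false := by
      simpa using hg
    simp [hb, hm]

-- A's early-return loop is the 'all' of pairwise membership in e2
theorem pv_loopA_eq_all (e1 e2 : List (String × String)) (h2 : (e2.map Prod.fst).Nodup) :
    is_equal_experiments_loopA e1 (PySem.Dict.mk e2) = e1.all (fun p => e2.contains p) := by
  induction e1 with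
  | nil => rfl
  | cons p rest ih =>
      obtain ⟨k, v⟩ := p
      rw [is_equal_experiments_loopA, pv_point e2 h2 k v]
      cases hc : e2.contains (k, v) <;>
        simp only [hc, ih, List.all_cons, Bool.false_and, Bool.true_and,
          Bool.false_eq_true, if_false, if_true]

-- cardinality core: with distinct keys on both sides, e1 ⊆ e2 pair-wise iff the number of
-- entries of e2 lying in e1 equals e1's length
theorem pv_all_eq_count (e1 e2 : List (String × String))
    (h1 : (e1.map Prod.fst).Nodup) (h2 : (e2.map Prod.fst).Nodup) :
    e1.all (fun p => e2.contains p)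
      = (((e2.countP (fun p => e1.contains p) : Int)) == (e1.length : Int)) := by
  have hne1 : e1.Nodup := List.Nodup.of_map Prod.fst h1
  have hne2 : e2.Nodup := List.Nodup.of_map Prod.fst h2
  rw [List.countP_eq_length_filter, Bool.eq_iff_iff]
  simp only [List.all_eq_true, List.contains_iff_mem, beq_iff_eq,
    Int.natCast_inj]
  set F := e2.filter (fun p => e1.contains p) with hF
  have hFnd : F.Nodup := hne2.filter _
  have hFsub : F ⊆ e1 := by
    intro p hp
    have := (List.mem_filter.mp hp).2
    simpa using this
  constructor
  · intro hall
    have hsub : e1 ⊆ F := by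
      intro p hp
      exact List.mem_filter.mpr ⟨hall p hp, by simpa using hp⟩
    have hle1 := (List.subperm_of_subset hne1 hsub).length_le
    have hle2 := (List.subperm_of_subset hFnd hFsub).length_le
    omega
  · intro hc p hp
    have hperm : F.Perm e1 :=
      (List.subperm_of_subset hFnd hFsub).perm_of_length_le (by omega)
    have hpF : p ∈ F := hperm.symm.subset hp
    exact (List.mem_filter.mp hpF).1

-- ===== VERDICT (by name: the statement is the Claim_ definition above) =====
theorem is_equal_experiments_spec : Claim_equal_is_equal_experiments := by
  intro e1 e2 _ hpre
  obtain ⟨h1, h2⟩ := hpre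
  show is_equal_experiments e1 e2 = is_equal_experiments_alt e1 e2
  rw [is_equal_experiments, is_equal_experiments_alt, pv_loopA_eq_all e1 e2 h2]
  show _ = (List.foldl _ (0 : Int) e2 == ((PySem.Dict.mk e1).size : Int))
  have hfold :
      e2.foldl (fun acc p =>
          if (PySem.Dict.mk e1).contains p.1 && ((PySem.Dict.mk e1).get? p.1 == some p.2)
          then acc + 1 else acc) (0 : Int)
        = (e2.countP (fun p => e1.contains p) : Int) := by
    have hcg : ∀ p ∈ e2,
        ((PySem.Dict.mk e1).contains p.1 && ((PySem.Dict.mk e1).get? p.1 == some p.2))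
          = e1.contains p := by
      intro p _; exact pv_point e1 h1 p.1 p.2
    calc e2.foldl (fun acc p =>
            if (PySem.Dict.mk e1).contains p.1 && ((PySem.Dict.mk e1).get? p.1 == some p.2)
            then acc + 1 else acc) (0 : Int)
        = e2.foldl (fun acc p => if e1.contains p then acc + 1 else acc) (0 : Int) := by
          apply PySem.List.foldl_congr_mem
          intro acc p hp
          rw [hcg p hp]
      _ = (e2.countP (fun p => e1.contains p) : Int) := by
          rw [PySem.List.foldl_if_add_one]; ring
  rw [hfold]
  exact pv_all_eq_count e1 e2 h1 h2
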